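-- pv_equiv track=rewrite | github.com/dodonquixote/whatsapp-automation-WAHA | backend/main.py | get_csv_headers
-- ===== SOURCE A (Python) =====
-- from typing import Any, Dict, List
--
-- def get_csv_headers(rows: List[Dict[str, Any]]) -> List[str]:
--     if not rows:
--         return []
--     # Prefer first row's key order; add any missing keys from later rows
--     headers: List[str] = list(rows[0].keys())
--     seen = set(headers)
--     for row in rows[1:]:
--         for k in row.keys():
--             if k not in seen:
--                 headers.append(k)
--                 seen.add(k)
--     return headers
-- ===== SOURCE B (Python) =====
-- from typing import Any, Dict, List
--
-- def get_csv_headers(rows: List[Dict[str, Any]]) -> List[str]: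
--     # Recursive decomposition: headers(rows) = keys of the first row,
--     # followed by the headers of the remaining rows with the first row's
--     # keys filtered out (the recursive result already has first-seen order).
--     if not rows:
--         return []
--     head = list(rows[0].keys())
--     tail = get_csv_headers(rows[1:])
--     return head + [k for k in tail if k not in rows[0]]
-- ===== Notes on version B (the rewrite author's own statement) =====
-- stated objective: alternative
-- what changed: Replaces the forward single pass with a mutable seen-set by top-down structural recursion on the row list: each level returns the first row's keys followed by the recursively computed headers of the remaining rows filtered against that row, so no seen-set or append loop exists.
import Mathlib
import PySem

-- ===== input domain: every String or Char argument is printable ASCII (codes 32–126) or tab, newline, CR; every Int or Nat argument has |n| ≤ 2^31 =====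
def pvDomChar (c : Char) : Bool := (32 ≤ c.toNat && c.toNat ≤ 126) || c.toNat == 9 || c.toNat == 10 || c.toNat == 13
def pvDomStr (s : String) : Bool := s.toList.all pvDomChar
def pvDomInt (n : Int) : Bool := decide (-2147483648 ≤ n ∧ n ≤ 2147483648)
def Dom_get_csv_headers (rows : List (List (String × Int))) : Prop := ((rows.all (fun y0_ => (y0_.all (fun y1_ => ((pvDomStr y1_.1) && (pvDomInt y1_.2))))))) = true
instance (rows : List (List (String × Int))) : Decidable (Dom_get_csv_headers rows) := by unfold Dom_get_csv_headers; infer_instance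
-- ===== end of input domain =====

-- B computes the same ordered-unique headers by structural recursion on the row list
-- (first row's keys ++ recursively computed later headers filtered against the first row)
-- instead of A's forward pass with a mutable seen-set — an alternative decomposition, same results.
-- ===== PORT A =====
-- transliteration of A: special-case empty, seed headers/seen from the first row's keys,
-- then nested loop appending each not-yet-seen key (a dict's .keys() is the dedup of its pair list's first components)
def get_csv_headers (rows : List (List (String × Int))) : List String :=
  match rows with
  | [] => []
  | r0 :: rest =>
    let headers : List String := PySem.List.dedup (r0.map Prod.fst)
    let seen : PySem.Set String := PySem.Set.ofList headers
    (rest.foldl (fun (st : List String × PySem.Set String) row =>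
        (PySem.List.dedup (row.map Prod.fst)).foldl
          (fun st k =>
            if PySem.Set.contains st.2 k then st
            else (st.1 ++ [k], PySem.Set.add st.2 k)) st)
      (headers, seen)).1

-- ===== PORT B =====
-- transliteration of B: if not rows: []; head = keys of rows[0];
-- tail = recursive call on rows[1:]; head + [k for k in tail if k not in rows[0]]
def get_csv_headers_alt (rows : List (List (String × Int))) : List String :=
  match rows with
  | [] => []
  | r0 :: rest =>
    let head : List String := PySem.List.dedup (r0.map Prod.fst)
    let tail : List String := get_csv_headers_alt rest
    head ++ tail.filter (fun k => !((r0.map Prod.fst).contains k))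

-- ===== PRECONDITION & SPEC =====
def Spec_get_csv_headers (rows : List (List (String × Int))) (out : List String) : Prop := out = get_csv_headers_alt rows
instance (rows : List (List (String × Int))) (out : List String) : Decidable (Spec_get_csv_headers rows out) := by unfold Spec_get_csv_headers; infer_instance

-- ===== CLAIM (what is proved, stated in full; the proofs are below) =====
def Claim_equal_get_csv_headers : Prop := ∀ (rows : List (List (String × Int))), Dom_get_csv_headers rows → Spec_get_csv_headers rows (get_csv_headers rows)

-- ===== LEMMAS AND PROOFS =====

-- A's inner loop over one row's keys, started at a set-shaped state, is Set.update
theorem pv_inner_fold (ks : List String) (s : List String) :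
    ks.foldl (fun (st : List String × PySem.Set String) k =>
        if PySem.Set.contains st.2 k then st
        else (st.1 ++ [k], PySem.Set.add st.2 k)) (s, s)
      = (PySem.Set.update s ks, PySem.Set.update s ks) := by
  induction ks generalizing s with
  | nil => simp [PySem.Set.update]
  | cons k ks ih =>
    rw [PySem.Set.update_cons]
    simp only [List.foldl_cons]
    by_cases hm : k ∈ s
    · simpa [hm, PySem.Set.add_of_mem hm] using ih s
    · simpa [hm, PySem.Set.add_of_not_mem hm] using ih (s ++ [k])

-- A's outer loop is a fold of Set.update over the rows
theorem pv_outer_fold (rows : List (List (String × Int))) (s : List String) :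
    (rows.foldl (fun (st : List String × PySem.Set String) row =>
        (PySem.Set.ofList (row.map Prod.fst)).foldl
          (fun st k =>
            if PySem.Set.contains st.2 k then st
            else (st.1 ++ [k], PySem.Set.add st.2 k)) st) (s, s)).1
      = rows.foldl (fun s row => PySem.Set.update s (PySem.Set.ofList (row.map Prod.fst))) s := by
  induction rows generalizing s with
  | nil => rfl
  | cons r rows ih =>
    simp only [List.foldl_cons, pv_inner_fold]
    exact ih _

-- the fold of Set.update equals B's recursion: it appends exactly the not-yet-seen headers
theorem pv_fold_update_eq (rows : List (List (String × Int))) (s : List String) :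
    rows.foldl (fun s row => PySem.Set.update s (PySem.Set.ofList (row.map Prod.fst))) s
      = s ++ (get_csv_headers_alt rows).filter (fun k => !(PySem.Set.contains s k)) := by
  induction rows generalizing s with
  | nil => simp [get_csv_headers_alt]
  | cons r rest ih =>
    simp only [List.foldl_cons, ih, get_csv_headers_alt, PySem.List.dedup_eq_ofList]
    rw [PySem.Set.update_eq_append_filter, PySem.Set.ofList_ofList,
      List.filter_append, List.filter_filter, List.append_assoc]
    congr 1
    · congr 1
      apply List.filter_congr
      intro k _
      by_cases h : k ∈ s <;> simp [h, List.mem_filter, PySem.Set.mem_ofList]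

-- ===== VERDICT (by name: the statement is the Claim_ definition above) =====
theorem get_csv_headers_spec : Claim_equal_get_csv_headers := by
  intro rows _
  unfold Spec_get_csv_headers
  cases rows with
  | nil => rfl
  | cons r0 rest =>
    show get_csv_headers (r0 :: rest) = get_csv_headers_alt (r0 :: rest)
    unfold get_csv_headers
    simp only [PySem.List.dedup_eq_ofList, PySem.Set.ofList_ofList]
    rw [pv_outer_fold, pv_fold_update_eq]
    conv_rhs => rw [get_csv_headers_alt]
    simp only [PySem.List.dedup_eq_ofList]
    congr 1
    apply List.filter_congr
    intro k _
    simp [PySem.Set.mem_ofList]
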